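-- pv_equiv track=rewrite | github.com/bavalpey/codefights | core/listBackwoods/reverseOnDiagonals.py | reverseOnDiagonals
-- ===== SOURCE A (Python) =====
-- def reverseOnDiagonals(matrix):
--     diag1 = []
--     diag2 = []
--     for row in range(len(matrix)):
--         for col in range(len(matrix[0])):
--             if row == col:
--                 diag1.append(matrix[row][col])
--                 diag2.append(matrix[::-1][row][col])
--     diag1 = diag1[::-1]
--     diag2 = diag2[::-1]
--     for row in range(len(matrix)):
--         for col in range(len(matrix[0])):
--             if row == col:
--                 matrix[row][col] = diag1[row]
--                 matrix[::-1][row][col] = diag2[row]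
--     return matrix
-- ===== SOURCE B (Python) =====
-- def reverseOnDiagonals(matrix):
--     n = len(matrix)
--     k = min(n, len(matrix[0])) if matrix else 0
--     d1 = [matrix[i][i] for i in range(k)]
--     d2 = [matrix[n - 1 - i][i] for i in range(k)]
--     for i in range(k):
--         matrix[i][i] = d1[k - 1 - i]
--     for i in range(k):
--         matrix[n - 1 - i][i] = d2[k - 1 - i]
--     return matrix
-- ===== Notes on version B (the rewrite author's own statement) =====
-- stated objective: alternative
-- what changed: Replaces A's two nested row-by-column scans (each rebuilding matrix[::-1] inside the inner loop) with a single direct loop over the k = min(rows, len(row0)) diagonal indices that reads both diagonals once and writes them back reversed.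
import Mathlib
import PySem

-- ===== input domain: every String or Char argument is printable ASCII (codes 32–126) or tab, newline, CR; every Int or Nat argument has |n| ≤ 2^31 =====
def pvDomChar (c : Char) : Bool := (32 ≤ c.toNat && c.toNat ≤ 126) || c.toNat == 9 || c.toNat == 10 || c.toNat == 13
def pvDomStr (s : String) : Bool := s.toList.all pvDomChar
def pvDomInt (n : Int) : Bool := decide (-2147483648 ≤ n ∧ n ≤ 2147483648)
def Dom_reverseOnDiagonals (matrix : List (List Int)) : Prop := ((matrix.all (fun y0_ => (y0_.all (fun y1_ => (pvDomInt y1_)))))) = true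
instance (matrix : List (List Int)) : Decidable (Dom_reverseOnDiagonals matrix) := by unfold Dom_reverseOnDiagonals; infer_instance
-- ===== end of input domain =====

-- B replaces A's two O(n^2) filtered scans (each rebuilding matrix[::-1] inside the inner
-- loop) by a single direct loop over the k diagonal indices (read both diagonals, write them
-- back reversed). Both A and B mutate `matrix` in place in Python; the equivalence proved
-- here is about the returned value.

-- shared helpers modelling Python's in-range element read / in-place element write
-- (Pre_ guarantees every index Python touches is in range, where these are exact)
def pvGet2 (m : List (List Int)) (r c : Nat) : Int := (m.getD r []).getD c 0
def pvSet2 (m : List (List Int)) (r c : Nat) (v : Int) : List (List Int) :=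
  m.set r ((m.getD r []).set c v)

-- ===== PORT A =====
def reverseOnDiagonals (matrix : List (List Int)) : List (List Int) :=
  let n := matrix.length
  let m0 := (matrix.headD []).length  -- len(matrix[0]); only evaluated when the outer loop runs
  -- first double loop: collect diag1, diag2 (matrix[::-1] is matrix.reverse, exact)
  let ds := (List.range n).foldl (fun (d : List Int × List Int) row =>
      (List.range m0).foldl (fun d col =>
        if row = col then
          (d.1 ++ [pvGet2 matrix row col], d.2 ++ [pvGet2 matrix.reverse row col])
        else d) d) ([], [])
  let diag1 := ds.1.reverse
  let diag2 := ds.2.reverse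
  -- second double loop: write back; matrix[::-1][row][col] = v mutates row n-1-row
  (List.range n).foldl (fun m row =>
    (List.range m0).foldl (fun m col =>
      if row = col then
        pvSet2 (pvSet2 m row col (diag1.getD row 0)) (n - 1 - row) col (diag2.getD row 0)
      else m) m) matrix

-- ===== PORT B =====
def reverseOnDiagonals_alt (matrix : List (List Int)) : List (List Int) :=
  let n := matrix.length
  let k := if matrix = [] then 0 else min n (matrix.headD []).length
  let d1 := (List.range k).map (fun i => pvGet2 matrix i i)
  let d2 := (List.range k).map (fun i => pvGet2 matrix (n - 1 - i) i)
  let m1 := (List.range k).foldl (fun m i => pvSet2 m i i (d1.getD (k - 1 - i) 0)) matrix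
  (List.range k).foldl (fun m i => pvSet2 m (n - 1 - i) i (d2.getD (k - 1 - i) 0)) m1

-- ===== PRECONDITION & SPEC =====
-- Pre_ excludes exactly the ragged matrices on which Python A raises IndexError
-- (some diagonal position it touches lies outside its row); B raises there too.
def Pre_reverseOnDiagonals (matrix : List (List Int)) : Prop :=
  ∀ r : Nat, r < min matrix.length (matrix.headD []).length →
    r < (matrix.getD r []).length ∧ r < (matrix.getD (matrix.length - 1 - r) []).length
instance (matrix : List (List Int)) : Decidable (Pre_reverseOnDiagonals matrix) := by
  unfold Pre_reverseOnDiagonals; infer_instance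

def pvWitness_reverseOnDiagonals : List (List Int) := [[1, 2], [3, 4]]

def Spec_reverseOnDiagonals (matrix : List (List Int)) (out : List (List Int)) : Prop := out = reverseOnDiagonals_alt matrix
instance (matrix : List (List Int)) (out : List (List Int)) : Decidable (Spec_reverseOnDiagonals matrix out) := by unfold Spec_reverseOnDiagonals; infer_instance

-- ===== CLAIM (what is proved, stated in full; the proofs are below) =====
def Claim_equal_reverseOnDiagonals : Prop := ∀ (matrix : List (List Int)), Dom_reverseOnDiagonals matrix → Pre_reverseOnDiagonals matrix → Spec_reverseOnDiagonals matrix (reverseOnDiagonals matrix)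

-- ===== LEMMAS AND PROOFS =====

-- inner loop of A: only the col = row iteration acts
theorem pv_foldl_range_if {σ : Type} (g : σ → Nat → σ) (row m0 : Nat) (s : σ) :
    (List.range m0).foldl (fun s col => if row = col then g s col else s) s
      = if row < m0 then g s row else s := by
  induction m0 with
  | zero => simp
  | succ m ih =>
    rw [List.range_succ, List.foldl_append]
    simp only [List.foldl_cons, List.foldl_nil]
    rw [ih]
    rcases lt_trichotomy row m with h | h | h
    · rw [if_neg (by omega : ¬ row = m), if_pos h, if_pos (by omega : row < m + 1)]
    · subst h
      rw [if_pos rfl, if_neg (by omega : ¬ row < row), if_pos (by omega : row < row + 1)]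
    · rw [if_neg (by omega : ¬ row = m), if_neg (by omega : ¬ row < m),
        if_neg (by omega : ¬ row < m + 1)]

-- outer loop of A: the guard row < k truncates range n to range (min n k)
theorem pv_foldl_range_guard {σ : Type} (h : σ → Nat → σ) (n k : Nat) (s : σ) :
    (List.range n).foldl (fun s r => if r < k then h s r else s) s
      = (List.range (min n k)).foldl h s := by
  induction n with
  | zero => simp
  | succ m ih =>
    rw [List.range_succ, List.foldl_append]
    by_cases hm : m < k
    · have : min (m + 1) k = min m k + 1 := by omega
      rw [this, List.range_succ, List.foldl_append, ih]
      have : min m k = m := by omega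
      simp [hm, this]
    · have : min (m + 1) k = min m k := by omega
      simp [this, ih, hm]

-- A's diagonal-collecting fold is a pair of maps
theorem pv_foldl_pair_append (a b : Nat → Int) (k : Nat) :
    (List.range k).foldl (fun (d : List Int × List Int) r => (d.1 ++ [a r], d.2 ++ [b r])) ([], [])
      = ((List.range k).map a, (List.range k).map b) := by
  induction k with
  | zero => simp
  | succ m ih => rw [List.range_succ, List.foldl_append, ih]; simp

-- List.set at distinct indices commutes
theorem pv_set_comm {α : Type} (a b : α) : ∀ (l : List α) (i j : Nat), i ≠ j →
    (l.set i a).set j b = (l.set j b).set i a := by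
  intro l
  induction l with
  | nil => intro i j _; rfl
  | cons x xs ih =>
    intro i j h
    cases i with
    | zero =>
      cases j with
      | zero => exact absurd rfl h
      | succ j => rfl
    | succ i =>
      cases j with
      | zero => rfl
      | succ j =>
        show x :: ((xs.set i a).set j b) = x :: ((xs.set j b).set i a)
        rw [ih i j (by omega)]

-- single-cell writes to distinct cells commute
theorem pvSet2_comm (m : List (List Int)) (r1 c1 : Nat) (v1 : Int) (r2 c2 : Nat) (v2 : Int)
    (h : r1 ≠ r2 ∨ c1 ≠ c2) :
    pvSet2 (pvSet2 m r1 c1 v1) r2 c2 v2 = pvSet2 (pvSet2 m r2 c2 v2) r1 c1 v1 := by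
  by_cases hr : r1 = r2
  · subst hr
    rcases h with h | hc
    · exact absurd rfl h
    by_cases hl : r1 < m.length
    · have hget : ∀ (x : List Int), (m.set r1 x).getD r1 [] = x := by
        intro x
        simp [List.getD_eq_getElem?_getD, hl]
      simp only [pvSet2, hget, List.set_set]
      rw [pv_set_comm _ _ _ _ _ hc]
    · have hnop : ∀ (x : List Int), m.set r1 x = m :=
        fun x => List.set_eq_of_length_le (by omega)
      simp [pvSet2, hnop]
  · have hget : ∀ (x : List Int) (i j : Nat), i ≠ j → (m.set i x).getD j [] = m.getD j [] := by
      intro x i j hij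
      simp [List.getD_eq_getElem?_getD, List.getElem?_set_ne hij]
    simp only [pvSet2, hget _ _ _ hr, hget _ _ _ (Ne.symm hr)]
    rw [pv_set_comm _ _ _ _ _ hr]

-- a write to a cell not touched by the fold can be pulled out of the fold
theorem pv_foldl_set2_pull (l : List Nat) (rc cc : Nat → Nat) (vv : Nat → Int)
    (r c : Nat) (v : Int) (m : List (List Int))
    (h : ∀ i ∈ l, rc i ≠ r ∨ cc i ≠ c) :
    l.foldl (fun m i => pvSet2 m (rc i) (cc i) (vv i)) (pvSet2 m r c v)
      = pvSet2 (l.foldl (fun m i => pvSet2 m (rc i) (cc i) (vv i)) m) r c v := by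
  induction l generalizing m with
  | nil => simp
  | cons x xs ih =>
    simp only [List.foldl_cons]
    rw [pvSet2_comm _ _ _ _ _ _ _ (by rcases h x (by simp) with h' | h' <;> [left; right] <;> omega)]
    exact ih _ (fun i hi => h i (by simp [hi]))

-- A's interleaved main/anti writes equal B's two separate passes
theorem pv_split_combined (n : Nat) (a b : Nat → Int) :
    ∀ (k : Nat) (m : List (List Int)),
    (List.range k).foldl (fun m r => pvSet2 (pvSet2 m r r (a r)) (n - 1 - r) r (b r)) m
      = (List.range k).foldl (fun m r => pvSet2 m (n - 1 - r) r (b r))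
          ((List.range k).foldl (fun m r => pvSet2 m r r (a r)) m) := by
  intro k
  induction k with
  | zero => simp
  | succ q ih =>
    intro m
    rw [List.range_succ]
    simp only [List.foldl_append, List.foldl_cons, List.foldl_nil]
    rw [ih m]
    congr 1
    rw [pv_foldl_set2_pull _ _ _ _ _ _ _ _
      (by intro i hi; right; have := List.mem_range.mp hi; omega)]

-- value lemma: reversed collected diagonal read at r < k
theorem pv_getD_reverse_map_range (a : Nat → Int) (k r : Nat) (h : r < k) :
    (((List.range k).map a).reverse).getD r 0 = a (k - 1 - r) := by
  have hlen : (((List.range k).map a).reverse).length = k := by simp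
  rw [List.getD_eq_getElem?_getD, List.getElem?_reverse (by simp [h]),
    List.getElem?_map]
  simp [List.getElem?_range (by omega : k - 1 - r < k)]

theorem pv_getD_map_range (a : Nat → Int) (k r : Nat) (h : r < k) :
    (((List.range k).map a)).getD r 0 = a r := by
  rw [List.getD_eq_getElem?_getD, List.getElem?_map]
  simp [List.getElem?_range h]

-- matrix[::-1][r] = matrix[n-1-r] for r < n
theorem pvGet2_reverse (matrix : List (List Int)) (r c : Nat) (h : r < matrix.length) :
    pvGet2 matrix.reverse r c = pvGet2 matrix (matrix.length - 1 - r) c := by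
  unfold pvGet2
  have hrow : matrix.reverse.getD r [] = matrix.getD (matrix.length - 1 - r) [] := by
    rw [List.getD_eq_getElem?_getD, List.getD_eq_getElem?_getD,
      List.getElem?_reverse (by simpa using h)]
  rw [hrow]

-- ===== VERDICT (by name: the statement is the Claim_ definition above) =====
theorem reverseOnDiagonals_spec : Claim_equal_reverseOnDiagonals := by
  intro matrix _ _
  unfold Spec_reverseOnDiagonals reverseOnDiagonals reverseOnDiagonals_alt
  simp only []
  set n := matrix.length with hn
  set m0 := (matrix.headD []).length with hm0
  set k := min n m0 with hk
  have hkB : (if matrix = [] then 0 else min n m0) = k := by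
    cases matrix <;> simp_all
  rw [hkB]
  -- collapse A's two double loops
  simp only [pv_foldl_range_if, pv_foldl_range_guard, ← hk]
  -- A's collected diagonals as maps
  rw [pv_foldl_pair_append (fun r => pvGet2 matrix r r) (fun r => pvGet2 matrix.reverse r r) k]
  -- replace matrix.reverse reads by direct reads (r < k ≤ n)
  have hmapb : (List.range k).map (fun r => pvGet2 matrix.reverse r r)
      = (List.range k).map (fun r => pvGet2 matrix (n - 1 - r) r) := by
    apply List.map_congr_left
    intro r hr
    exact pvGet2_reverse matrix r r (by have := List.mem_range.mp hr; omega)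
  rw [hmapb]
  -- rewrite the value reads on both sides to the common function of r
  have hA : (List.range k).foldl (fun m r =>
        pvSet2 (pvSet2 m r r ((((List.range k).map (fun r => pvGet2 matrix r r)).reverse).getD r 0))
          (n - 1 - r) r ((((List.range k).map (fun r => pvGet2 matrix (n - 1 - r) r)).reverse).getD r 0)) matrix
      = (List.range k).foldl (fun m r =>
        pvSet2 (pvSet2 m r r (pvGet2 matrix (k - 1 - r) (k - 1 - r)))
          (n - 1 - r) r (pvGet2 matrix (n - 1 - (k - 1 - r)) (k - 1 - r))) matrix := by
    apply PySem.List.foldl_congr_mem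
    intro m r hr
    have hrk := List.mem_range.mp hr
    rw [pv_getD_reverse_map_range _ _ _ hrk, pv_getD_reverse_map_range _ _ _ hrk]
  have hB1 : (List.range k).foldl (fun m i =>
        pvSet2 m i i ((((List.range k).map (fun i => pvGet2 matrix i i))).getD (k - 1 - i) 0)) matrix
      = (List.range k).foldl (fun m i => pvSet2 m i i (pvGet2 matrix (k - 1 - i) (k - 1 - i))) matrix := by
    apply PySem.List.foldl_congr_mem
    intro m i hi
    have hik := List.mem_range.mp hi
    rw [pv_getD_map_range _ _ _ (by omega)]
  rw [hA]
  rw [pv_split_combined n (fun r => pvGet2 matrix (k - 1 - r) (k - 1 - r))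
    (fun r => pvGet2 matrix (n - 1 - (k - 1 - r)) (k - 1 - r)) k matrix]
  rw [hB1]
  apply PySem.List.foldl_congr_mem
  intro acc i hi
  have hik := List.mem_range.mp hi
  rw [pv_getD_map_range _ _ _ (by omega : k - 1 - i < k)]
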